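-- pv_equiv track=rewrite | github.com/Fitzy1293/Berkshire-County-Covid | nytimes_covid.py | shortenTable
-- ===== SOURCE A (Python) =====
-- def dateFormat(nytDate):
--     return '/'.join(nytDate.split('-')[1:] + [nytDate.split('-')[0]])
--
-- def shortenTable(rows):
--     fixedFirstDay = [
--                 dateFormat(rows[1][0]),
--                 f'{rows[1][-2]} Δ={rows[1][-2]}',
--                 f'{rows[1][-1]} Δ={rows[1][-1]}'
--                 ]
--
--     returnRows = [fixedFirstDay]
--
--     previous = rows[1]
--     for i in rows[2:]:
--         row = [dateFormat(i[0])]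
--         caseDiff = f'{i[-2]}: Δ={int(i[-2]) - int(previous[-2])}'
--         deathDiff = f'{i[-1]}: Δ={int(i[-1]) - int(previous[-1])}'
--
--         row.extend((caseDiff, deathDiff))
--         returnRows.append(row)
--         previous = i
--
--     return returnRows
-- ===== SOURCE B (Python) =====
-- def dateFormat(nytDate):
--     parts = nytDate.split('-')
--     return '/'.join(parts[1:] + [parts[0]])
--
-- def deltaColumn(vals):
--     # first cell: colon-less seed; rest: value with delta to the previous value
--     return [f'{vals[0]} \u0394={vals[0]}'] + \
--            [f'{vals[k]}: \u0394={int(vals[k]) - int(vals[k - 1])}'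
--             for k in range(1, len(vals))]
--
-- def shortenTable(rows):
--     data = rows[1:]
--     dates = [dateFormat(r[0]) for r in data]
--     caseCol = deltaColumn([r[-2] for r in data])
--     deathCol = deltaColumn([r[-1] for r in data])
--     return [list(t) for t in zip(dates, caseCol, deathCol)]
-- ===== Notes on version B (the rewrite author's own statement) =====
-- stated objective: alternative
-- what changed: Replaced A's single streaming pass with a mutable `previous` row by a columnar (struct-of-arrays) staging: extract the date/case/death columns of rows[1:] separately, build each delta column independently by index, then transpose the three columns back into rows with zip.
import Mathlib
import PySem

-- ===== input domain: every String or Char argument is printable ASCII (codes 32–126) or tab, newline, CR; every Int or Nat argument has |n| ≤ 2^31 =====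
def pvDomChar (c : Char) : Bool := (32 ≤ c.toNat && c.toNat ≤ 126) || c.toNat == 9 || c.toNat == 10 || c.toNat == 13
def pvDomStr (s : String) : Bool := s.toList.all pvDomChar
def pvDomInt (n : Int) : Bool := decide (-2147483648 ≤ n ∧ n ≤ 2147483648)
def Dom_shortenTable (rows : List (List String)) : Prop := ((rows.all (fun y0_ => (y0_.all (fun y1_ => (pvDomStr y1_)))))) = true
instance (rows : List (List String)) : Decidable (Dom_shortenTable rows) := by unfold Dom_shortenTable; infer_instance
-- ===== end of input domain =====

-- B replaces A's single streaming pass with a mutable `previous` row by a columnar staging: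
-- extract the three columns of rows[1:], build each delta column by index, then transpose (objective: alternative; return values identical).

-- ===== PORT A =====
def pvDateFormatA (nytDate : String) : String :=
  PySem.Str.join "/"
    (PySem.List.slice ((PySem.Str.split? nytDate "-").getD []) (some 1) none
      ++ [PySem.List.pyGetD ((PySem.Str.split? nytDate "-").getD []) 0 ""])

-- int(s): Pre_ guarantees the parse succeeds; outside Pre_ Python raises ValueError
def pvIntA (s : String) : Int := (PySem.Int.ofStr? s).getD 0

def shortenTable (rows : List (List String)) : List (List String) :=
  let r1 := PySem.List.pyGetD rows 1 []          -- rows[1]; Pre_ guarantees it exists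
  let fixedFirstDay : List String :=
    [ pvDateFormatA (PySem.List.pyGetD r1 0 ""),
      PySem.List.pyGetD r1 (-2) "" ++ " Δ=" ++ PySem.List.pyGetD r1 (-2) "",
      PySem.List.pyGetD r1 (-1) "" ++ " Δ=" ++ PySem.List.pyGetD r1 (-1) "" ]
  ((PySem.List.slice rows (some 2) none).foldl
    (fun (st : List String × List (List String)) i =>
      let row : List String := [pvDateFormatA (PySem.List.pyGetD i 0 "")]
      let caseDiff := PySem.List.pyGetD i (-2) "" ++ ": Δ=" ++
        PySem.Int.toStr (pvIntA (PySem.List.pyGetD i (-2) "") - pvIntA (PySem.List.pyGetD st.1 (-2) ""))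
      let deathDiff := PySem.List.pyGetD i (-1) "" ++ ": Δ=" ++
        PySem.Int.toStr (pvIntA (PySem.List.pyGetD i (-1) "") - pvIntA (PySem.List.pyGetD st.1 (-1) ""))
      (i, st.2 ++ [row ++ [caseDiff, deathDiff]]))
    (r1, [fixedFirstDay])).2

-- ===== PORT B =====
def pvDateFormatB (nytDate : String) : String :=
  let parts := (PySem.Str.split? nytDate "-").getD []
  PySem.Str.join "/" (PySem.List.slice parts (some 1) none ++ [PySem.List.pyGetD parts 0 ""])

def pvIntB (s : String) : Int := (PySem.Int.ofStr? s).getD 0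

-- deltaColumn(vals): colon-less seed from vals[0], then per-index delta cells
def pvDeltaColumnB (vals : List String) : List String :=
  (PySem.List.pyGetD vals 0 "" ++ " Δ=" ++ PySem.List.pyGetD vals 0 "") ::
    (PySem.List.pyRange 1 vals.length 1).map (fun k =>
      PySem.List.pyGetD vals k "" ++ ": Δ=" ++
        PySem.Int.toStr (pvIntB (PySem.List.pyGetD vals k "") - pvIntB (PySem.List.pyGetD vals (k - 1) "")))

def shortenTable_alt (rows : List (List String)) : List (List String) :=
  let data := PySem.List.slice rows (some 1) none
  let dates := data.map (fun r => pvDateFormatB (PySem.List.pyGetD r 0 ""))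
  let caseCol := pvDeltaColumnB (data.map (fun r => PySem.List.pyGetD r (-2) ""))
  let deathCol := pvDeltaColumnB (data.map (fun r => PySem.List.pyGetD r (-1) ""))
  (dates.zip (caseCol.zip deathCol)).map (fun t => [t.1, t.2.1, t.2.2])

-- ===== PRECONDITION & SPEC =====
-- Pre_: rows[1] must exist, every used row needs index -2 (so length ≥ 2), and when the
-- loop runs (rows.length ≥ 3) every row of rows[1:] must have int-parseable last two cells;
-- outside this, Python A raises IndexError or ValueError.
def Pre_shortenTable (rows : List (List String)) : Prop :=
  2 ≤ rows.length
  ∧ (∀ r ∈ rows.drop 1, 2 ≤ r.length)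
  ∧ (3 ≤ rows.length → ∀ r ∈ rows.drop 1,
      (PySem.Int.ofStr? (PySem.List.pyGetD r (-2) "")).isSome = true
      ∧ (PySem.Int.ofStr? (PySem.List.pyGetD r (-1) "")).isSome = true)
instance (rows : List (List String)) : Decidable (Pre_shortenTable rows) := by
  unfold Pre_shortenTable; infer_instance

def pvWitness_shortenTable : List (List String) :=
  [["date", "cases", "deaths"], ["2020-03-01", "5", "1"], ["2020-03-02", "8", "2"]]

def Spec_shortenTable (rows : List (List String)) (out : List (List String)) : Prop := out = shortenTable_alt rows
instance (rows : List (List String)) (out : List (List String)) : Decidable (Spec_shortenTable rows out) := by unfold Spec_shortenTable; infer_instance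

-- ===== CLAIM (what is proved, stated in full; the proofs are below) =====
def Claim_equal_shortenTable : Prop := ∀ (rows : List (List String)), Dom_shortenTable rows → Pre_shortenTable rows → Spec_shortenTable rows (shortenTable rows)

-- ===== LEMMAS AND PROOFS =====

-- A's loop with the mutable `previous` as fold state equals a map over adjacent pairs.
theorem pv_foldl_zip (g : List String → List String → List String) :
    ∀ (xs : List (List String)) (p : List String) (acc : List (List String)),
      (xs.foldl (fun st i => (i, st.2 ++ [g st.1 i])) (p, acc)).2
        = acc ++ ((p :: xs).zip xs).map (fun pc => g pc.1 pc.2) := by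
  intro xs
  induction xs with
  | nil => intro p acc; simp
  | cons x xs ih => intro p acc; simp [ih]


theorem pv_getD_succ (x : String) (l : List String) (k : Nat) (d : String) :
    PySem.List.pyGetD (x :: l) ((k : Int) + 1) d = PySem.List.pyGetD l (k : Int) d := by
  have h : ((k : Int) + 1) = ((k + 1 : Nat) : Int) := by push_cast; ring
  rw [h, PySem.List.pyGetD_natCast, PySem.List.pyGetD_natCast]
  simp [List.getD]

theorem pv_getD_zero (l : List String) :
    ∀ (x d : String), PySem.List.pyGetD (x :: l) ((0 : Nat) : Int) d = x := by
  intro x d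
  rw [PySem.List.pyGetD_natCast]
  simp [List.getD]

theorem pv_getD_succ' (x : String) (l : List String) (i : Int) (hi : 0 ≤ i) (d : String) :
    PySem.List.pyGetD (x :: l) (i + 1) d = PySem.List.pyGetD l i d := by
  obtain ⟨k, rfl⟩ := Int.eq_ofNat_of_zero_le hi
  exact pv_getD_succ x l k d

theorem pv_range_adjacent (g : String → String → String) :
    ∀ (vals : List String),
      (List.range (vals.length - 1)).map (fun (k : Nat) =>
          g (PySem.List.pyGetD vals ((k : Int) + 1) "") (PySem.List.pyGetD vals ((k : Int)) ""))
        = (vals.zip (vals.drop 1)).map (fun pc => g pc.2 pc.1) := by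
  intro vals
  induction vals with
  | nil => simp
  | cons a tl ih =>
    match tl with
    | [] => simp
    | b :: t =>
      have hlen : (a :: b :: t).length - 1 = ((b :: t).length - 1) + 1 := by simp
      rw [hlen, List.range_succ_eq_map, List.map_cons, List.map_map]
      have hzip : (a :: b :: t).zip ((a :: b :: t).drop 1) = (a, b) :: ((b :: t).zip ((b :: t).drop 1)) := by simp
      rw [hzip, List.map_cons]
      refine congrArg₂ List.cons ?_ ?_
      · show g (PySem.List.pyGetD (a :: b :: t) (((0 : Nat) : Int) + 1) "")
              (PySem.List.pyGetD (a :: b :: t) ((0 : Nat) : Int) "") = g b a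
        rw [pv_getD_succ, pv_getD_zero, pv_getD_zero]
      · rw [← ih]
        apply List.map_congr_left
        intro k _
        show g (PySem.List.pyGetD (a :: b :: t) (((k + 1 : Nat) : Int) + 1) "")
              (PySem.List.pyGetD (a :: b :: t) ((k + 1 : Nat) : Int) "")
            = g (PySem.List.pyGetD (b :: t) ((k : Int) + 1) "") (PySem.List.pyGetD (b :: t) (k : Int) "")
        have e2 : ((k + 1 : Nat) : Int) = ((k : Int) + 1) := by push_cast; ring
        rw [e2, pv_getD_succ' a (b :: t) ((k : Int) + 1) (by positivity),
            pv_getD_succ' b t (k : Int) (by positivity), pv_getD_succ]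

-- zipping the tail with a map over the adjacent pairs is itself a map over the adjacent pairs
theorem pv_zip_tail_map {A B : Type} (h : (A × A) → B) :
    ∀ (t : List A) (a : A),
      t.zip (((a :: t).zip t).map h) = ((a :: t).zip t).map (fun pc => (pc.2, h pc)) := by
  intro t
  induction t with
  | nil => intro a; rfl
  | cons b t ih => intro a; simp [ih b]

theorem shortenTable_eq (rows : List (List String)) (hlen : 2 ≤ rows.length) :
    shortenTable rows = shortenTable_alt rows := by
  obtain ⟨r0, r1, rest, rfl⟩ : ∃ r0 r1 rest, rows = r0 :: r1 :: rest := by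
    match rows, hlen with
    | r0 :: r1 :: rest, _ => exact ⟨r0, r1, rest, rfl⟩
  unfold shortenTable shortenTable_alt pvDeltaColumnB
  rw [pv_foldl_zip (fun p i =>
        [pvDateFormatA (PySem.List.pyGetD i 0 "")] ++
        [ PySem.List.pyGetD i (-2) "" ++ ": Δ=" ++
            PySem.Int.toStr (pvIntA (PySem.List.pyGetD i (-2) "") - pvIntA (PySem.List.pyGetD p (-2) "")),
          PySem.List.pyGetD i (-1) "" ++ ": Δ=" ++
            PySem.Int.toStr (pvIntA (PySem.List.pyGetD i (-1) "") - pvIntA (PySem.List.pyGetD p (-1) "")) ])]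
  have hs2 : PySem.List.slice (r0 :: r1 :: rest) (some 2) none = rest := by
    rw [PySem.List.slice_from _ (by norm_num)]; rfl
  have hs1 : PySem.List.slice (r0 :: r1 :: rest) (some 1) none = r1 :: rest := by
    rw [PySem.List.slice_from _ (by norm_num)]; rfl
  have hg1 : PySem.List.pyGetD (r0 :: r1 :: rest) 1 ([] : List String) = r1 := by
    rw [show (1 : Int) = ((1 : Nat) : Int) by norm_num, PySem.List.pyGetD_natCast]; rfl
  rw [hs2, hs1, hg1]
  dsimp only
  -- turn each of B's two indexed delta columns into a map over adjacent pairs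
  have hcol : ∀ (vals : List String),
      (PySem.List.pyRange 1 (vals.length : Int) 1).map (fun k =>
        PySem.List.pyGetD vals k "" ++ ": Δ=" ++
          PySem.Int.toStr (pvIntB (PySem.List.pyGetD vals k "") - pvIntB (PySem.List.pyGetD vals (k - 1) "")))
        = (vals.zip (vals.drop 1)).map (fun pc =>
            pc.2 ++ ": Δ=" ++ PySem.Int.toStr (pvIntB pc.2 - pvIntB pc.1)) := by
    intro vals
    rw [PySem.List.pyRange_one, List.map_map,
        show ((vals.length : Int) - 1).toNat = vals.length - 1 by omega]
    rw [← pv_range_adjacent (fun cur prev => cur ++ ": Δ=" ++ PySem.Int.toStr (pvIntB cur - pvIntB prev)) vals]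
    apply List.map_congr_left
    intro k _
    have e1 : (1 : Int) + (k : Int) = (k : Int) + 1 := by ring
    have e2 : (1 : Int) + (k : Int) - 1 = (k : Int) := by ring
    have e3 : (k : Int) + 1 - 1 = (k : Int) := by ring
    simp only [Function.comp, e1, e3]
  rw [hcol, hcol]
  simp only [List.map_cons, List.drop_succ_cons, List.drop_zero, List.cons_append, List.nil_append]
  refine congrArg₂ List.cons ?_ ?_
  · simp only [PySem.List.pyGetD_zero_cons]
    rfl
  · rw [show (PySem.List.pyGetD r1 (-2) "" :: rest.map (fun r => PySem.List.pyGetD r (-2) ""))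
          = (r1 :: rest).map (fun r => PySem.List.pyGetD r (-2) "") from rfl,
        show (PySem.List.pyGetD r1 (-1) "" :: rest.map (fun r => PySem.List.pyGetD r (-1) ""))
          = (r1 :: rest).map (fun r => PySem.List.pyGetD r (-1) "") from rfl]
    simp only [← List.zip_eq_zipWith]
    rw [List.zip_map, List.zip_map, List.zip_map, List.zip_map, List.zip_map']
    rw [pv_zip_tail_map _ rest r1, List.map_map, List.map_map]
    apply List.map_congr_left
    intro pc _
    rfl

-- ===== VERDICT (by name: the statement is the Claim_ definition above) =====
theorem shortenTable_spec : Claim_equal_shortenTable := by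
  intro rows _dom pre
  exact shortenTable_eq rows pre.1
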